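-- pv_equiv track=rewrite | github.com/wzygxr/shuati | class147_DynamicProgrammingAndGameTheory/Code02_EatGrass.py | can_win_sg
-- ===== SOURCE A (Python) =====
-- def can_win_sg(n: int) -> str:
--     """SG函数解法"""
--     if n == 0:
--         return "B"
--
--     # SG函数计算
--     sg = [0] * (n + 1)
--     moves = [1, 4, 16]
--
--     for i in range(1, n + 1):
--         mex = [False] * (n + 1)
--
--         for move in moves:
--             if i >= move:
--                 mex[sg[i - move]] = True
--
--         # 计算mex值
--         g = 0
--         while mex[g]:
--             g += 1
--         sg[i] = g
--
--     return "A" if sg[n] > 0 else "B"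
-- ===== SOURCE B (Python) =====
-- def can_win_sg(n: int) -> str:
--     # Closed form: losing positions of the {1,4,16} subtraction game repeat with period 5
--     # (16 == 1 mod 5), so the SG value is zero exactly when n % 5 is 0 or 2.
--     if n < 0:
--         raise ValueError("n must be a nonnegative stone count")
--     return "B" if n % 5 in (0, 2) else "A"
-- ===== Notes on version B (the rewrite author's own statement) =====
-- stated objective: faster
-- what changed: Replaces the O(n^2) SG-table/mex computation with the O(1) closed form 'B iff n % 5 in {0,2}' (the losing positions are periodic with period 5 since 16 = 1 mod 5); like A, B raises on negative n (ValueError instead of A's IndexError), and Pre_ excludes n < 0.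
import Mathlib
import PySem

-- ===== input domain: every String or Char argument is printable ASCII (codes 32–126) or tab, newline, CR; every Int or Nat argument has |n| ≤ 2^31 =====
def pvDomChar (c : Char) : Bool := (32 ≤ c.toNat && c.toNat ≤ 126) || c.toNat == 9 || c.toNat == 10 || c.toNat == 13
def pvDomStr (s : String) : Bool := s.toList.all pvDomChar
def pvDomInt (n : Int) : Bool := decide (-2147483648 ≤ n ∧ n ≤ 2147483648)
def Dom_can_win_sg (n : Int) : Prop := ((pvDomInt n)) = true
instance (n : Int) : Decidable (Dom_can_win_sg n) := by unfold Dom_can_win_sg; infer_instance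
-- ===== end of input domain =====

-- B replaces A's O(n^2) SG-table/mex loop by the period-5 closed form (16 ≡ 1 mod 5): "B" iff n % 5 ∈ {0,2}.

-- ===== PORT A =====
-- the 'while mex[g]: g += 1' loop: it scans mex from the left and stops at the first false entry
-- (exact here: the loop never runs off the end, since at most three entries of mex are true and mex is longer)
def pvMexCount : List Bool → Int
  | [] => 0
  | b :: t => if b then 1 + pvMexCount t else 0

-- one iteration of A's outer 'for i in range(1, n+1)' loop (N = n+1, the table size)
def pvBody (N : Nat) (sg : List Int) (i : Int) : List Int :=
  let mex0 : List Bool := List.replicate N false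
  let mex := ([1, 4, 16] : List Int).foldl (fun mex move =>
    if move ≤ i then PySem.List.pySetD mex (PySem.List.pyGetD sg (i - move) 0) true else mex) mex0
  PySem.List.pySetD sg i (pvMexCount mex)

def can_win_sg (n : Int) : String :=
  if n = 0 then "B" else
    let N := (n + 1).toNat
    let sg0 : List Int := List.replicate N 0
    let sg := (PySem.List.pyRange 1 (n + 1) 1).foldl (pvBody N) sg0
    if 0 < PySem.List.pyGetD sg n 0 then "A" else "B"

-- ===== PORT B =====
def can_win_sg_alt (n : Int) : String :=
  if n < 0 then ""   -- Source B raises ValueError here (outside Pre_); no String value exists to return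
  else
    let r := PySem.Int.mod n 5
    if r = 0 ∨ r = 2 then "B" else "A"

-- ===== PRECONDITION & SPEC =====
-- Pre_ excludes n < 0, where A raises IndexError (the SG table is empty and sg[n] is out of range)
-- and B raises ValueError.
def Pre_can_win_sg (n : Int) : Prop := 0 ≤ n
instance (n : Int) : Decidable (Pre_can_win_sg n) := by unfold Pre_can_win_sg; infer_instance
def pvWitness_can_win_sg : Int := (7)

def Spec_can_win_sg (n : Int) (out : String) : Prop := out = can_win_sg_alt n
instance (n : Int) (out : String) : Decidable (Spec_can_win_sg n out) := by unfold Spec_can_win_sg; infer_instance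

-- ===== CLAIM (what is proved, stated in full; the proofs are below) =====
def Claim_equal_can_win_sg : Prop := ∀ (n : Int), Dom_can_win_sg n → Pre_can_win_sg n → Spec_can_win_sg n (can_win_sg n)

-- ===== LEMMAS AND PROOFS =====

-- closed-form SG value of position j (j ≥ 0): the period-5 table [0,1,0,1,2]
def pvF (j : Int) : Int :=
  let r := PySem.Int.mod j 5
  if r = 1 ∨ r = 3 then 1 else if r = 4 then 2 else 0

lemma pvF_emod (j : Int) :
    pvF j = (if j % 5 = 1 ∨ j % 5 = 3 then (1:Int) else if j % 5 = 4 then 2 else 0) := by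
  simp only [pvF, PySem.Int.mod_eq_emod_of_pos (show (0:Int) < 5 by norm_num)]

-- the partially-filled SG table after processing indices 1..i-1
def pvTab (N : Nat) (i : Int) : List Int :=
  (List.range N).map (fun (j : Nat) => if (j:Int) < i then pvF (j:Int) else 0)

lemma pvTab_get (N : Nat) (i k : Int) (h0 : 0 ≤ k) (hk : k < i) (_hN : k < N) :
    PySem.List.pyGetD (pvTab N i) k 0 = pvF k := by
  rw [PySem.List.pyGetD_eq_getElem _ _ h0
    (by simp only [pvTab, List.length_map, List.length_range]; omega)]
  simp only [pvTab, List.getElem_map, List.getElem_range]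
  have hc : ((k.toNat : Int)) = k := Int.toNat_of_nonneg h0
  rw [hc, if_pos hk]

lemma pvTab_set (N : Nat) (i : Int) (h0 : 0 ≤ i) (_hN : i < N) :
    (pvTab N i).set i.toNat (pvF i) = pvTab N (i + 1) := by
  apply List.ext_getElem (by simp [pvTab])
  intro k hk1 hk2
  have hkN : k < N := by
    simpa only [pvTab, List.length_map, List.length_range] using hk2
  simp only [pvTab, List.getElem_set, List.getElem_map, List.getElem_range]
  by_cases hki : i.toNat = k
  · rw [if_pos hki, if_pos (by omega : (k:Int) < i + 1)]
    have hc : ((k:Int)) = i := by omega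
    rw [hc]
  · rw [if_neg hki]
    have hc : ((k:Int) < i) ↔ ((k:Int) < i + 1) := by omega
    simp only [hc]

-- one loop iteration extends the table by its closed-form SG value
lemma pvStep (N : Nat) (i : Int) (h1 : 1 ≤ i) (h2 : i < N) :
    pvBody N (pvTab N i) i = pvTab N (i + 1) := by
  have hg : ∀ m : Int, 1 ≤ m → m ≤ i → PySem.List.pyGetD (pvTab N i) (i - m) 0 = pvF (i - m) := by
    intro m hm1 hm2
    exact pvTab_get N i (i - m) (by omega) (by omega) (by omega)
  suffices key : pvMexCount (([1, 4, 16] : List Int).foldl (fun mex move =>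
      if move ≤ i then PySem.List.pySetD mex (PySem.List.pyGetD (pvTab N i) (i - move) 0) true else mex)
      (List.replicate N false)) = pvF i by
    show PySem.List.pySetD (pvTab N i) i _ = _
    rw [key, PySem.List.pySetD_of_nonneg _ _ (by omega), pvTab_set N i (by omega) h2]
  simp only [List.foldl]
  rw [if_pos h1, hg 1 (by norm_num) h1]
  by_cases h4 : (4:Int) ≤ i
  · rw [if_pos h4, hg 4 (by norm_num) h4]
    obtain ⟨m, rfl⟩ : ∃ m, N = m + 3 := ⟨N - 3, by omega⟩
    have hrep : List.replicate (m+3) false = false :: false :: false :: List.replicate m false := by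
      simp [show m+3 = 3+m by omega, List.replicate_add]
    have hr5 : i % 5 = 0 ∨ i % 5 = 1 ∨ i % 5 = 2 ∨ i % 5 = 3 ∨ i % 5 = 4 := by omega
    rcases hr5 with hr | hr | hr | hr | hr
    · have e1 : pvF (i - 1) = 2 := by
        rw [pvF_emod]; have h : (i-1) % 5 = 4 := by omega
        rw [h]; norm_num
      have e4 : pvF (i - 4) = 1 := by
        rw [pvF_emod]; have h : (i-4) % 5 = 1 := by omega
        rw [h]; norm_num
      have ei : pvF i = 0 := by
        rw [pvF_emod, hr]; norm_num
      rw [e1, e4, ei]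
      by_cases h16 : (16:Int) ≤ i
      · rw [if_pos h16, hg 16 (by norm_num) h16]
        have e16 : pvF (i - 16) = 2 := by
          rw [pvF_emod]; have h : (i-16) % 5 = 4 := by omega
          rw [h]; norm_num
        rw [e16]
        simp [hrep, PySem.List.pySetD_of_nonneg, pvMexCount]
      · rw [if_neg h16]
        simp [hrep, PySem.List.pySetD_of_nonneg, pvMexCount]
    · have e1 : pvF (i - 1) = 0 := by
        rw [pvF_emod]; have h : (i-1) % 5 = 0 := by omega
        rw [h]; norm_num
      have e4 : pvF (i - 4) = 0 := by
        rw [pvF_emod]; have h : (i-4) % 5 = 2 := by omega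
        rw [h]; norm_num
      have ei : pvF i = 1 := by
        rw [pvF_emod, hr]; norm_num
      rw [e1, e4, ei]
      by_cases h16 : (16:Int) ≤ i
      · rw [if_pos h16, hg 16 (by norm_num) h16]
        have e16 : pvF (i - 16) = 0 := by
          rw [pvF_emod]; have h : (i-16) % 5 = 0 := by omega
          rw [h]; norm_num
        rw [e16]
        simp [hrep, PySem.List.pySetD_of_nonneg, pvMexCount]
      · rw [if_neg h16]
        simp [hrep, PySem.List.pySetD_of_nonneg, pvMexCount]
    · have e1 : pvF (i - 1) = 1 := by
        rw [pvF_emod]; have h : (i-1) % 5 = 1 := by omega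
        rw [h]; norm_num
      have e4 : pvF (i - 4) = 1 := by
        rw [pvF_emod]; have h : (i-4) % 5 = 3 := by omega
        rw [h]; norm_num
      have ei : pvF i = 0 := by
        rw [pvF_emod, hr]; norm_num
      rw [e1, e4, ei]
      by_cases h16 : (16:Int) ≤ i
      · rw [if_pos h16, hg 16 (by norm_num) h16]
        have e16 : pvF (i - 16) = 1 := by
          rw [pvF_emod]; have h : (i-16) % 5 = 1 := by omega
          rw [h]; norm_num
        rw [e16]
        simp [hrep, PySem.List.pySetD_of_nonneg, pvMexCount]
      · rw [if_neg h16]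
        simp [hrep, PySem.List.pySetD_of_nonneg, pvMexCount]
    · have e1 : pvF (i - 1) = 0 := by
        rw [pvF_emod]; have h : (i-1) % 5 = 2 := by omega
        rw [h]; norm_num
      have e4 : pvF (i - 4) = 2 := by
        rw [pvF_emod]; have h : (i-4) % 5 = 4 := by omega
        rw [h]; norm_num
      have ei : pvF i = 1 := by
        rw [pvF_emod, hr]; norm_num
      rw [e1, e4, ei]
      by_cases h16 : (16:Int) ≤ i
      · rw [if_pos h16, hg 16 (by norm_num) h16]
        have e16 : pvF (i - 16) = 0 := by
          rw [pvF_emod]; have h : (i-16) % 5 = 2 := by omega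
          rw [h]; norm_num
        rw [e16]
        simp [hrep, PySem.List.pySetD_of_nonneg, pvMexCount]
      · rw [if_neg h16]
        simp [hrep, PySem.List.pySetD_of_nonneg, pvMexCount]
    · have e1 : pvF (i - 1) = 1 := by
        rw [pvF_emod]; have h : (i-1) % 5 = 3 := by omega
        rw [h]; norm_num
      have e4 : pvF (i - 4) = 0 := by
        rw [pvF_emod]; have h : (i-4) % 5 = 0 := by omega
        rw [h]; norm_num
      have ei : pvF i = 2 := by
        rw [pvF_emod, hr]; norm_num
      rw [e1, e4, ei]
      by_cases h16 : (16:Int) ≤ i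
      · rw [if_pos h16, hg 16 (by norm_num) h16]
        have e16 : pvF (i - 16) = 1 := by
          rw [pvF_emod]; have h : (i-16) % 5 = 3 := by omega
          rw [h]; norm_num
        rw [e16]
        simp [hrep, PySem.List.pySetD_of_nonneg, pvMexCount]
      · rw [if_neg h16]
        simp [hrep, PySem.List.pySetD_of_nonneg, pvMexCount]
  · rw [if_neg h4, if_neg (by omega : ¬ (16:Int) ≤ i)]
    have hi : i = 1 ∨ i = 2 ∨ i = 3 := by omega
    rcases hi with rfl | rfl | rfl
    · obtain ⟨m, rfl⟩ : ∃ m, N = m + 2 := ⟨N - 2, by omega⟩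
      have hrep : List.replicate (m+2) false = false :: false :: List.replicate m false := by
        simp [show m+2 = 2+m by omega, List.replicate_add]
      simp [hrep, PySem.List.pySetD_of_nonneg, pvF, PySem.Int.mod, pvMexCount]
    · obtain ⟨m, rfl⟩ : ∃ m, N = m + 3 := ⟨N - 3, by omega⟩
      have hrep : List.replicate (m+3) false = false :: false :: false :: List.replicate m false := by
        simp [show m+3 = 3+m by omega, List.replicate_add]
      simp [hrep, PySem.List.pySetD_of_nonneg, pvF, PySem.Int.mod, pvMexCount]
    · obtain ⟨m, rfl⟩ : ∃ m, N = m + 4 := ⟨N - 4, by omega⟩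
      have hrep : List.replicate (m+4) false = false :: false :: false :: false :: List.replicate m false := by
        simp [show m+4 = 4+m by omega, List.replicate_add]
      simp [hrep, PySem.List.pySetD_of_nonneg, pvF, PySem.Int.mod, pvMexCount]

lemma pvInv (n : Nat) (_hn : 1 ≤ n) : ∀ (k : Nat), k ≤ n →
    (PySem.List.pyRange 1 (1 + (k:Int)) 1).foldl (pvBody (n+1)) (List.replicate (n+1) (0:Int))
      = pvTab (n+1) (1 + (k:Int)) := by
  intro k
  induction k with
  | zero =>
    intro _
    rw [show (1 + ((0:Nat):Int)) = 1 by norm_num, PySem.List.pyRange_one_eq_nil le_rfl]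
    simp only [List.foldl]
    apply List.ext_getElem (by simp [pvTab])
    intro j hj1 hj2
    simp only [List.getElem_replicate, pvTab, List.getElem_map, List.getElem_range]
    by_cases hj : j = 0
    · subst hj
      rw [if_pos (by norm_num)]
      decide
    · rw [if_neg (by omega)]
  | succ k ih =>
    intro hk
    rw [show (1 + ((k+1:Nat):Int)) = (1 + (k:Int)) + 1 by push_cast; ring,
        PySem.List.pyRange_one_succ_right (by omega), List.foldl_append]
    simp only [List.foldl]
    rw [ih (by omega)]
    exact pvStep (n+1) (1 + (k:Int)) (by omega) (by push_cast; omega)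

-- ===== VERDICT =====
theorem can_win_sg_spec : Claim_equal_can_win_sg := by
  intro n _ hpre
  unfold Pre_can_win_sg at hpre
  unfold Spec_can_win_sg
  by_cases hn0 : n = 0
  · subst hn0; decide
  · have hn1 : 1 ≤ n := by omega
    obtain ⟨n', rfl⟩ : ∃ m : Nat, n = (m:Int) := ⟨n.toNat, (Int.toNat_of_nonneg hpre).symm⟩
    have hn'1 : 1 ≤ n' := by exact_mod_cast hn1
    unfold can_win_sg
    rw [if_neg hn0]
    have hN : ((n':Int) + 1).toNat = n' + 1 := by omega
    have hfold := pvInv n' hn'1 n' (le_refl n')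
    rw [show (1 + (n':Int)) = (n':Int) + 1 by ring] at hfold
    simp only [hN, hfold]
    rw [pvTab_get (n'+1) ((n':Int)+1) (n':Int) (by omega) (by omega) (by push_cast; omega)]
    rw [pvF_emod]
    have hr : PySem.Int.mod (n':Int) 5 = (n':Int) % 5 :=
      PySem.Int.mod_eq_emod_of_pos (by norm_num)
    unfold can_win_sg_alt
    rw [if_neg (by omega : ¬ ((n':Int) < 0))]
    simp only [hr]
    have h5 : (n':Int) % 5 = 0 ∨ (n':Int) % 5 = 1 ∨ (n':Int) % 5 = 2 ∨ (n':Int) % 5 = 3 ∨ (n':Int) % 5 = 4 := by omega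
    rcases h5 with h | h | h | h | h <;> simp [h]
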